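-- pv_equiv track=rewrite | github.com/bymars/topcoder | srm670/Drbalance.py | lesscng
-- ===== SOURCE A (Python) =====
-- def lesscng(s, k):
--     neg_count = 0
--     balance = [0] * len(s)
--     bal = 0
--     for i in range(len(s)):
--         if s[i] == '-':
--             bal -= 1
--         elif s[i] == '+':
--             bal += 1
--         if bal < 0:
--             neg_count += 1
--         balance[i] = bal
--     res = 0
--     while neg_count > k:
--         for i in range(len(balance)):
--             balance[i] += 2
--             if balance[i] < 2 and balance[i] >= 0:
--                 neg_count -= 1
--         res += 1
--
--     return res
-- ===== SOURCE B (Python) =====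
-- def lesscng(s, k):
--     # One pass collects the negative prefix balances; if more than k of them
--     # exist, the answer is the number of +2 rounds needed to lift the
--     # (k+1)-th smallest one to >= 0, i.e. ceil(-b/2).
--     bal = 0
--     negs = []
--     for c in s:
--         if c == '-':
--             bal -= 1
--         elif c == '+':
--             bal += 1
--         if bal < 0:
--             negs.append(bal)
--     if len(negs) <= k:
--         return 0
--     negs.sort()
--     return (-negs[k] + 1) // 2
-- ===== Notes on version B (the rewrite author's own statement) =====
-- stated objective: faster
-- what changed: B replaces A's repeated add-2-to-every-balance sweeps by one pass collecting the negative prefix balances, a sort, and a closed-form ceiling division on the (k+1)-th smallest one.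
-- outside the precondition, e.g. on lesscng('-', -1): A does not finish within the time limit, B returns 1
import Mathlib
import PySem

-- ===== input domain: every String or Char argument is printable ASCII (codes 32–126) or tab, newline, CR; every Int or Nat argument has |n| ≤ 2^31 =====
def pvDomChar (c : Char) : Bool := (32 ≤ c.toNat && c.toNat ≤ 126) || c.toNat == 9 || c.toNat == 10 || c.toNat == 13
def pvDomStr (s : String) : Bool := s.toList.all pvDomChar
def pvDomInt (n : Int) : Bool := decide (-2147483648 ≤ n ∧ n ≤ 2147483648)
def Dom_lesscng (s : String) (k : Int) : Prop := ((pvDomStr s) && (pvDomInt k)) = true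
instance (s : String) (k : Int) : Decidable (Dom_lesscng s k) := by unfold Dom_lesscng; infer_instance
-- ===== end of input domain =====

-- B replaces A's repeated +2 sweeps by one pass collecting negative prefix balances
-- plus a sort and a closed-form ceiling division on the (k+1)-th smallest one.

-- ===== PORT A =====
-- one round of A's while-body: balance[i] += 2 for every i, decrementing neg when the
-- new value lands in [0, 2)
def lesscngRound (balance : List Int) (neg : Int) : List Int × Int :=
  balance.foldl (fun acc b =>
    let b' := b + 2
    (acc.1 ++ [b'], if b' < 2 ∧ 0 ≤ b' then acc.2 - 1 else acc.2)) ([], neg)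

-- A's while loop; the fuel argument only makes the recursion total (the Python loop
-- diverges when k < 0, which Pre_lesscng excludes; under Pre_ the proof shows
-- length s + 1 rounds always suffice, so the fuel never runs out)
def lesscngLoop (fuel : Nat) (balance : List Int) (neg k res : Int) : Int :=
  match fuel with
  | 0 => res
  | f + 1 =>
    if neg > k then
      let st := lesscngRound balance neg
      lesscngLoop f st.1 st.2 k (res + 1)
    else res

def lesscng (s : String) (k : Int) : Int :=
  let init := s.toList.foldl (fun (acc : List Int × Int × Int) c =>
    let bal := if c = '-' then acc.2.1 - 1 else if c = '+' then acc.2.1 + 1 else acc.2.1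
    let neg := if bal < 0 then acc.2.2 + 1 else acc.2.2
    (acc.1 ++ [bal], bal, neg)) ([], 0, 0)
  lesscngLoop (s.toList.length + 1) init.1 init.2.2 k 0

-- ===== PORT B =====
def lesscng_alt (s : String) (k : Int) : Int :=
  let st := s.toList.foldl (fun (acc : Int × List Int) c =>
    let bal := if c = '-' then acc.1 - 1 else if c = '+' then acc.1 + 1 else acc.1
    (bal, if bal < 0 then acc.2 ++ [bal] else acc.2)) (0, [])
  let negs := st.2
  if (negs.length : Int) ≤ k then 0
  else
    match PySem.List.pyGet? (PySem.List.sorted negs (fun x => x) false) k with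
    | some b => PySem.Int.floordiv (-b + 1) 2
    | none => 0   -- unreachable: the guard gives 0 ≤ k < len(negs) under Pre_

-- ===== PRECONDITION & SPEC =====
-- A's while loop never terminates when k < 0 (neg_count can never drop below 0),
-- so Pre_ admits exactly the nonnegative k, on which Python A returns.
def Pre_lesscng (s : String) (k : Int) : Prop := 0 ≤ k
instance (s : String) (k : Int) : Decidable (Pre_lesscng s k) := by unfold Pre_lesscng; infer_instance
def pvWitness_lesscng : String × Int := ("--+-", 1)

def Spec_lesscng (s : String) (k : Int) (out : Int) : Prop := out = lesscng_alt s k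
instance (s : String) (k : Int) (out : Int) : Decidable (Spec_lesscng s k out) := by unfold Spec_lesscng; infer_instance

-- ===== CLAIM (what is proved, stated in full; the proofs are below) =====
def Claim_equal_lesscng : Prop := ∀ (s : String) (k : Int), Dom_lesscng s k → Pre_lesscng s k → Spec_lesscng s k (lesscng s k)

-- ===== LEMMAS AND PROOFS =====


-- the prefix-balance step and the list of prefix balances
def pvStep (b : Int) (c : Char) : Int :=
  if c = '-' then b - 1 else if c = '+' then b + 1 else b

def pvBals : List Char → Int → List Int
  | [], _ => []
  | c :: cs, b => pvStep b c :: pvBals cs (pvStep b c)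

-- number of prefix balances still negative after r rounds of +2
def pvCnt (l : List Int) (r : Nat) : Nat := l.countP (fun b => decide (b + 2 * (r : Int) < 0))

lemma pvBals_lb : ∀ (cs : List Char) (b0 : Int), ∀ b ∈ pvBals cs b0, b0 - cs.length ≤ b := by
  intro cs
  induction cs with
  | nil => intro b0 b hb; simp [pvBals] at hb
  | cons c cs ih =>
    intro b0 b hb
    have hstep : b0 - 1 ≤ pvStep b0 c := by
      unfold pvStep; split_ifs <;> omega
    rcases List.mem_cons.mp hb with h | h
    · subst h; simp; omega
    · have := ih (pvStep b0 c) b h; simp at this ⊢; omega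

lemma pvCnt_exists (l : List Int) (k : Int) (hk : 0 ≤ k) : ∃ r, (pvCnt l r : Int) ≤ k := by
  refine ⟨l.foldr (fun b m => max b.natAbs m) 0, ?_⟩
  have h0 : pvCnt l (l.foldr (fun b m => max b.natAbs m) 0) = 0 := by
    apply List.countP_eq_zero.mpr
    intro b hb
    simp only [decide_eq_true_eq, not_lt]
    have hle : b.natAbs ≤ l.foldr (fun b m => max b.natAbs m) 0 := by
      induction l with
      | nil => simp at hb
      | cons x xs ih =>
        rcases List.mem_cons.mp hb with h | h
        · subst h; simp [List.foldr]
        · simp [List.foldr]; right; exact ih h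
    omega
  rw [h0]; exact_mod_cast hk

-- the least number of rounds after which at most k negatives remain
def pvN (l : List Int) (k : Int) (hk : 0 ≤ k) : Nat := Nat.find (pvCnt_exists l k hk)

-- A's first loop builds the prefix-balance list and the count of negative ones
lemma pv_buildA : ∀ (cs : List Char) (pre : List Int) (b0 n0 : Int),
    cs.foldl (fun (acc : List Int × Int × Int) c =>
      let bal := if c = '-' then acc.2.1 - 1 else if c = '+' then acc.2.1 + 1 else acc.2.1
      let neg := if bal < 0 then acc.2.2 + 1 else acc.2.2
      (acc.1 ++ [bal], bal, neg)) (pre, b0, n0)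
    = (pre ++ pvBals cs b0, cs.foldl pvStep b0,
       n0 + ((pvBals cs b0).countP (fun b => decide (b < 0)) : Int)) := by
  intro cs
  induction cs with
  | nil => intro pre b0 n0; simp [pvBals]
  | cons c cs ih =>
    intro pre b0 n0
    simp only [List.foldl_cons, pvBals]
    rw [ih]
    simp only [pvStep, List.countP_cons, Prod.mk.injEq, decide_eq_true_eq]
    refine ⟨by simp, by trivial, ?_⟩
    split_ifs <;> push_cast <;> omega

-- B's loop builds the list of negative prefix balances
lemma pv_buildB : ∀ (cs : List Char) (b0 : Int) (acc0 : List Int),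
    cs.foldl (fun (acc : Int × List Int) c =>
      let bal := if c = '-' then acc.1 - 1 else if c = '+' then acc.1 + 1 else acc.1
      (bal, if bal < 0 then acc.2 ++ [bal] else acc.2)) (b0, acc0)
    = (cs.foldl pvStep b0, acc0 ++ (pvBals cs b0).filter (fun b => decide (b < 0))) := by
  intro cs
  induction cs with
  | nil => intro b0 acc0; simp [pvBals]
  | cons c cs ih =>
    intro b0 acc0
    simp only [List.foldl_cons, pvBals]
    rw [ih]
    simp only [pvStep, List.filter_cons, decide_eq_true_eq]
    split_ifs <;> simp

-- one round of A's while body adds 2 everywhere and subtracts the cleared count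
lemma pv_round_aux : ∀ (l : List Int) (pre : List Int) (neg : Int),
    l.foldl (fun (acc : List Int × Int) b =>
      let b' := b + 2
      (acc.1 ++ [b'], if b' < 2 ∧ 0 ≤ b' then acc.2 - 1 else acc.2)) (pre, neg)
    = (pre ++ l.map (· + 2), neg - (l.countP (fun b => decide (b + 2 < 2 ∧ 0 ≤ b + 2)) : Int)) := by
  intro l
  induction l with
  | nil => intro pre neg; simp
  | cons x xs ih =>
    intro pre neg
    simp only [List.foldl_cons, List.map_cons, List.countP_cons]
    rw [ih]
    simp only [Prod.mk.injEq, decide_eq_true_eq]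
    refine ⟨by simp, ?_⟩
    split_ifs <;> push_cast <;> omega

lemma pv_round (l : List Int) (neg : Int) :
    lesscngRound l neg
    = (l.map (· + 2), neg - (l.countP (fun b => decide (b + 2 < 2 ∧ 0 ≤ b + 2)) : Int)) := by
  unfold lesscngRound; exact pv_round_aux l [] neg

lemma pvCnt_map (l : List Int) (r : Nat) : pvCnt (l.map (· + 2)) r = pvCnt l (r + 1) := by
  unfold pvCnt
  rw [List.countP_map]
  apply List.countP_congr
  intro b _
  simp only [Function.comp_apply, decide_eq_true_eq]
  push_cast
  omega

lemma pvCnt_split (l : List Int) :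
    pvCnt l 0 = pvCnt l 1 + l.countP (fun b => decide (b + 2 < 2 ∧ 0 ≤ b + 2)) := by
  unfold pvCnt
  induction l with
  | nil => simp
  | cons x xs ih =>
    simp only [List.countP_cons]
    simp only [decide_eq_true_eq]
    split_ifs <;> omega

-- the while loop counts exactly pvN rounds when given enough fuel
lemma pv_loop (k : Int) (hk : 0 ≤ k) : ∀ (fuel : Nat) (l : List Int) (res : Int),
    pvN l k hk < fuel →
    lesscngLoop fuel l (pvCnt l 0 : Int) k res = res + (pvN l k hk : Int) := by
  intro fuel
  induction fuel with
  | zero => intro l res h; omega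
  | succ f ih =>
    intro l res hf
    unfold lesscngLoop
    by_cases hcase : (pvCnt l 0 : Int) ≤ k
    · have hN : pvN l k hk = 0 := by
        unfold pvN; rw [Nat.find_eq_zero]; exact hcase
      rw [hN, if_neg (show ¬ ((pvCnt l 0 : Int) > k) by omega)]
      omega
    · have hg : (pvCnt l 0 : Int) > k := by omega
      rw [if_pos hg, pv_round]
      have hst2 : (pvCnt l 0 : Int) - (l.countP (fun b => decide (b + 2 < 2 ∧ 0 ≤ b + 2)) : Int)
          = (pvCnt (l.map (· + 2)) 0 : Int) := by
        rw [pvCnt_map]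
        simp only [Nat.zero_add]
        have := pvCnt_split l
        omega
      have hNpos : 0 < pvN l k hk := by
        unfold pvN
        rcases Nat.eq_zero_or_pos (Nat.find (pvCnt_exists l k hk)) with h | h
        · exfalso; exact hcase (by have := Nat.find_spec (pvCnt_exists l k hk); rwa [h] at this)
        · exact h
      have hNmap : pvN (l.map (· + 2)) k hk = pvN l k hk - 1 := by
        unfold pvN
        rw [Nat.find_eq_iff]
        constructor
        · rw [pvCnt_map]
          have h1 : Nat.find (pvCnt_exists l k hk) - 1 + 1 = Nat.find (pvCnt_exists l k hk) := by
            unfold pvN at hNpos; omega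
          rw [h1]
          exact Nat.find_spec (pvCnt_exists l k hk)
        · intro j hj
          rw [pvCnt_map]
          exact Nat.find_min (pvCnt_exists l k hk) (by unfold pvN at hNpos; omega)
      simp only [hst2]
      rw [ih (l.map (· + 2)) (res + 1) (by omega)]
      rw [hNmap]
      have : 0 < pvN l k hk := hNpos
      push_cast [Nat.cast_sub (by omega : 1 ≤ pvN l k hk)]
      ring

-- A equals pvN of the prefix-balance list
lemma pv_A (s : String) (k : Int) (hk : 0 ≤ k) :
    lesscng s k = (pvN (pvBals s.toList 0) k hk : Int) := by
  unfold lesscng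
  rw [pv_buildA]
  have hcnt0 : ((pvBals s.toList 0).countP (fun b => decide (b < 0)) : Int)
      = (pvCnt (pvBals s.toList 0) 0 : Int) := by
    unfold pvCnt
    congr 1
    apply List.countP_congr
    intro b _
    constructor <;> intro h <;> (simp only [decide_eq_true_eq] at h ⊢; omega)
  simp only [zero_add, List.nil_append]
  rw [hcnt0]
  rw [pv_loop k hk]
  · omega
  · -- fuel sufficiency: pvN ≤ length, since after length rounds no balance is negative
    have hP : (pvCnt (pvBals s.toList 0) s.toList.length : Int) ≤ k := by
      have h0 : pvCnt (pvBals s.toList 0) s.toList.length = 0 := by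
        apply List.countP_eq_zero.mpr
        intro b hb
        have := pvBals_lb s.toList 0 b hb
        have hlen : (pvBals s.toList 0).length ≤ s.toList.length := by
          clear this hb
          generalize (0 : Int) = b0
          induction s.toList generalizing b0 with
          | nil => simp [pvBals]
          | cons c cs ih => simp [pvBals]; exact ih _
        simp only [decide_eq_true_eq, not_lt]
        omega
      rw [h0]; exact_mod_cast hk
    have : pvN (pvBals s.toList 0) k hk ≤ s.toList.length := by
      unfold pvN
      exact Nat.find_le hP
    omega

-- in a ≤-sorted list, at most kk elements are < t iff the element at kk is ≥ t
lemma pv_sorted_count (L : List Int) (hL : L.Pairwise (· ≤ ·)) (kk : Nat) (hkk : kk < L.length)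
    (t : Int) : L.countP (fun b => decide (b < t)) ≤ kk ↔ t ≤ L[kk] := by
  have hmono : ∀ p q : Nat, ∀ _hp : p < L.length, ∀ hq : q < L.length, p ≤ q → L[p] ≤ L[q] := by
    intro p q hp hq hpq
    rcases Nat.lt_or_eq_of_le hpq with h | h
    · exact (List.pairwise_iff_getElem.mp hL) p q hp hq h
    · subst h; rfl
  constructor
  · intro hc
    by_contra hlt
    push_neg at hlt
    have hdecomp := (List.take_append_drop (kk + 1) L).symm
    have hcnt : L.countP (fun b => decide (b < t))
        = (L.take (kk + 1)).countP (fun b => decide (b < t))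
          + (L.drop (kk + 1)).countP (fun b => decide (b < t)) := by
      conv_lhs => rw [hdecomp]
      exact List.countP_append ..
    have htake : (L.take (kk + 1)).countP (fun b => decide (b < t)) = (L.take (kk + 1)).length := by
      apply List.countP_eq_length.mpr
      intro b hb
      rcases List.mem_iff_getElem.mp hb with ⟨j, hj, hbj⟩
      have hj2 : j < kk + 1 := by
        have := hj; simp [List.length_take] at this; omega
      have : b = L[j]'(by omega) := by
        rw [← hbj]; exact (List.getElem_take).symm ▸ rfl
      have hble : b ≤ L[kk] := by
        rw [this]; exact hmono j kk (by omega) hkk (by omega)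
      simp only [decide_eq_true_eq]; omega
    have hlen : (L.take (kk + 1)).length = kk + 1 := by
      simp [List.length_take]; omega
    omega
  · intro ht
    have hdecomp := (List.take_append_drop kk L).symm
    have hcnt : L.countP (fun b => decide (b < t))
        = (L.take kk).countP (fun b => decide (b < t))
          + (L.drop kk).countP (fun b => decide (b < t)) := by
      conv_lhs => rw [hdecomp]
      exact List.countP_append ..
    have hdrop : (L.drop kk).countP (fun b => decide (b < t)) = 0 := by
      apply List.countP_eq_zero.mpr
      intro b hb
      rcases List.mem_iff_getElem.mp hb with ⟨j, hj, hbj⟩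
      have hjlen : kk + j < L.length := by
        have := hj; simp [List.length_drop] at this; omega
      have hbeq : b = L[kk + j]'hjlen := by
        rw [← hbj]; exact (List.getElem_drop ..).symm ▸ rfl
      have : L[kk] ≤ L[kk + j]'hjlen := hmono kk (kk + j) (by omega) hjlen (by omega)
      simp only [decide_eq_true_eq, not_lt]
      omega
    have := List.countP_le_length (p := fun b => decide (b < t)) (l := L.take kk)
    have hlen : (L.take kk).length ≤ kk := by simp [List.length_take]
    omega

-- B equals pvN of the prefix-balance list
lemma pv_B (s : String) (k : Int) (hk : 0 ≤ k) :
    lesscng_alt s k = (pvN (pvBals s.toList 0) k hk : Int) := by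
  unfold lesscng_alt
  rw [pv_buildB]
  simp only [List.nil_append]
  set bals := pvBals s.toList 0 with hbals
  set negs := bals.filter (fun b => decide (b < 0)) with hnegs
  have hnegmem : ∀ x ∈ negs, x < 0 := by
    intro x hx
    have := List.of_mem_filter hx
    simpa using this
  have hcnt0 : pvCnt bals 0 = negs.length := by
    unfold pvCnt
    rw [hnegs, ← List.countP_eq_length_filter]
    apply List.countP_congr
    intro b _
    constructor <;> intro h <;> (simp only [decide_eq_true_eq] at h ⊢; omega)
  -- the counts may be taken over negs only (for r ≥ 0 every counted element is negative)
  have hcnt_negs : ∀ r : Nat, pvCnt bals r = negs.countP (fun b => decide (b + 2 * (r : Int) < 0)) := by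
    intro r
    unfold pvCnt
    rw [hnegs, List.countP_filter]
    apply List.countP_congr
    intro b _
    simp only [Bool.and_eq_true, decide_eq_true_eq]
    omega
  by_cases hc : (negs.length : Int) ≤ k
  · rw [if_pos hc]
    have : pvN bals k hk = 0 := by
      unfold pvN
      rw [Nat.find_eq_zero]
      rw [hcnt0]; exact_mod_cast hc
    rw [this]; rfl
  · rw [if_neg hc]
    push_neg at hc
    set L := PySem.List.sorted negs (fun x => x) false with hL
    have hLperm : L.Perm negs := PySem.List.sorted_perm ..
    have hLlen : L.length = negs.length := hLperm.length_eq
    have hLsorted : L.Pairwise (· ≤ ·) := by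
      exact PySem.List.sorted_pairwise (xs := negs) (key := fun x => x)
    have hkk : k.toNat < L.length := by rw [hLlen]; omega
    have hget : PySem.List.pyGet? L k = some (L[k.toNat]'hkk) :=
      PySem.List.pyGet?_eq_some_getElem L hk (by omega)
    rw [hget]
    set b := L[k.toNat]'hkk with hb
    have hbneg : b < 0 := by
      apply hnegmem
      exact hLperm.mem_iff.mp (List.getElem_mem hkk)
    -- counts over L, compared with kk, characterise pvN
    have hiff : ∀ r : Nat, ((pvCnt bals r : Int) ≤ k ↔ 0 ≤ b + 2 * (r : Int)) := by
      intro r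
      rw [hcnt_negs r]
      rw [← hLperm.countP_eq]
      have hcong : L.countP (fun x => decide (x + 2 * (r : Int) < 0))
          = L.countP (fun x => decide (x < -(2 * (r : Int)))) := by
        apply List.countP_congr
        intro x _
        constructor <;> intro h <;> (simp only [decide_eq_true_eq] at h ⊢; omega)
      rw [hcong]
      rw [show ((L.countP fun x => decide (x < -(2 * (r:Int)))) : Int) ≤ k
            ↔ L.countP (fun x => decide (x < -(2 * (r:Int)))) ≤ k.toNat by omega]
      rw [pv_sorted_count L hLsorted k.toNat hkk (-(2 * (r : Int)))]
      constructor <;> intro h <;> omega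
    change PySem.Int.floordiv (-b + 1) 2 = (pvN bals k hk : Int)
    have hfd : PySem.Int.floordiv (-b + 1) 2 = (-b + 1) / 2 :=
      PySem.Int.floordiv_eq_ediv_of_pos (by omega)
    rw [hfd]
    have hVpos : 1 ≤ (-b + 1) / 2 := by omega
    have hNv : pvN bals k hk = ((-b + 1) / 2).toNat := by
      unfold pvN
      rw [Nat.find_eq_iff]
      constructor
      · rw [show ((pvCnt bals ((-b + 1) / 2).toNat : Int) ≤ k) = ((pvCnt bals ((-b + 1) / 2).toNat : Int) ≤ k) from rfl]
        rw [hiff]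
        omega
      · intro j hj
        rw [hiff]
        omega
    rw [hNv]
    omega

theorem pv_main (s : String) (k : Int) (hk : 0 ≤ k) :
    lesscng s k = lesscng_alt s k := by
  rw [pv_A s k hk, pv_B s k hk]

-- ===== VERDICT (by name: the statement is the Claim_ definition above) =====
theorem lesscng_spec : Claim_equal_lesscng := by
  intro s k _ hk
  exact pv_main s k hk
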